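-- pv_equiv track=rewrite | github.com/nihathalici/Modern-Python-Cookbook | CHPT-08-Functional-and-Reactive-Programming-Features/Exer-04-Picking-a-subset-three-ways-to-filter.py | row_merge
-- ===== SOURCE A (Python) =====
-- def row_merge(source_iter):
--     group = []
--     for row in source_iter:
--         if len(row[0]) != 0:
--             if group:
--                 yield group
--             group = row.copy()
--         else:
--             group.extend(row)
--     if group:
--         yield group
-- ===== SOURCE B (Python) =====
-- def row_merge(source_iter):
--     # Right-to-left pass: continuation rows accumulate in `pending` until the
--     # header row to their left claims them; a leading continuation run becomes
--     # its own first group.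
--     out = []
--     pending = []
--     for row in reversed(list(source_iter)):
--         if len(row[0]) != 0:
--             out.insert(0, list(row) + pending)
--             pending = []
--         else:
--             pending = list(row) + pending
--     if pending:
--         out.insert(0, pending)
--     yield from out
-- ===== Notes on version B (the rewrite author's own statement) =====
-- stated objective: alternative
-- what changed: Replaces A's forward accumulate-and-flush generator (mutating a growing group, yielding on each new header) by a right-to-left pass that keeps only the pending continuation suffix and conses each finished group to the front of the output.
import Mathlib
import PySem

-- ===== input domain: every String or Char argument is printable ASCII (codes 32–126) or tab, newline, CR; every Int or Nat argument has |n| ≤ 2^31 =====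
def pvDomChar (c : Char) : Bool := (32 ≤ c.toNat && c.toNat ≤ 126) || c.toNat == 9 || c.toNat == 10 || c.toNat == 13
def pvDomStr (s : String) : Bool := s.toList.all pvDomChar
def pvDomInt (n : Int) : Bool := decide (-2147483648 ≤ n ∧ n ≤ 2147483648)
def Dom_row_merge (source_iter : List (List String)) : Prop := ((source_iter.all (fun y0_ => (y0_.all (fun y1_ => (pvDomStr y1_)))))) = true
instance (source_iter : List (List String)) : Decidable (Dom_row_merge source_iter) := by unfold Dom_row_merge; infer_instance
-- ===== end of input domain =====

-- B rebuilds the groups in a right-to-left pass (pending-suffix accumulator, cons to the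
-- front) instead of A's forward accumulate-and-flush loop; return values proved equal on
-- inputs whose rows are all nonempty (both Pythons raise IndexError on an empty row).

-- ===== PORT A =====
-- A's loop over source_iter with state (yielded output, group); `row[0]` exists on every
-- row admitted by Pre_, so `headD ""` is exact there (an empty row is outside Pre_).
def rowMergeA : List (List String) → List String → List (List String)
  | [], group => if group.isEmpty then [] else [group]
  | row :: rest, group =>
      if (row.headD "").length ≠ 0 then
        if group.isEmpty then rowMergeA rest row
        else group :: rowMergeA rest row
      else rowMergeA rest (group ++ row)

def row_merge (source_iter : List (List String)) : List (List String) :=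
  rowMergeA source_iter []

-- ===== PORT B =====
-- Source B: iterate over reversed(list(source_iter)) with state (out, pending); insert(0, ..)
-- is cons; the final `if pending:` prepends the leading continuation run.
def row_merge_alt (source_iter : List (List String)) : List (List String) :=
  let st := source_iter.reverse.foldl
    (fun (st : List (List String) × List String) row =>
      if (row.headD "").length ≠ 0 then ((row ++ st.2) :: st.1, [])
      else (st.1, row ++ st.2))
    ([], [])
  if st.2.isEmpty then st.1 else st.2 :: st.1

-- ===== PRECONDITION & SPEC =====
-- Both Pythons evaluate row[0] on every row, raising IndexError on an empty row: those
-- inputs are excluded.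
def Pre_row_merge (source_iter : List (List String)) : Prop :=
  ∀ row ∈ source_iter, row ≠ []
instance (source_iter : List (List String)) : Decidable (Pre_row_merge source_iter) := by
  unfold Pre_row_merge; infer_instance
def pvWitness_row_merge : List (List String) :=
  [["a", "b"], ["", "c"], ["d"]]
def Spec_row_merge (source_iter : List (List String)) (out : List (List String)) : Prop := out = row_merge_alt source_iter
instance (source_iter : List (List String)) (out : List (List String)) : Decidable (Spec_row_merge source_iter out) := by unfold Spec_row_merge; infer_instance

-- ===== CLAIM (what is proved, stated in full; the proofs are below) =====
def Claim_equal_row_merge : Prop := ∀ (source_iter : List (List String)), Dom_row_merge source_iter → Pre_row_merge source_iter → Spec_row_merge source_iter (row_merge source_iter)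

-- ===== LEMMAS AND PROOFS =====

-- The foldr view of B's reversed-foldl loop.
def rmBStep (row : List String) (st : List (List String) × List String) :
    List (List String) × List String :=
  if (row.headD "").length ≠ 0 then ((row ++ st.2) :: st.1, []) else (st.1, row ++ st.2)

lemma row_merge_alt_foldr (s : List (List String)) :
    row_merge_alt s =
      (let st := s.foldr rmBStep ([], []);
       if st.2.isEmpty then st.1 else st.2 :: st.1) := by
  simp only [row_merge_alt, List.foldl_reverse]
  rfl

-- Invariant: A's loop from state `group` produces B's groups, with `group` merged into
-- the leading continuation run of the remaining rows.
lemma rowMergeA_eq (s : List (List String)) : ∀ group : List String,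
    rowMergeA s group =
      (let st := s.foldr rmBStep ([], []);
       if (group ++ st.2).isEmpty then st.1 else (group ++ st.2) :: st.1) := by
  induction s with
  | nil => intro group; cases group <;> simp [rowMergeA]
  | cons row rest ih =>
    intro group
    by_cases h : row.head?.getD "" = ""
    · have h' : ¬ (row.headD "").length ≠ 0 := by simp [List.headD_eq_head?_getD, h]
      simp only [rowMergeA, if_neg h', ih (group ++ row), List.foldr, rmBStep]
      simp [List.append_assoc]
    · have h' : (row.headD "").length ≠ 0 := by
        simp only [List.headD_eq_head?_getD]
        simpa using h
      have hrow : row ≠ [] := by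
        intro hr; subst hr; simp at h'
      cases group with
      | nil =>
        simp [rowMergeA, List.foldr, rmBStep, if_neg h, ih row, hrow]
      | cons g gs =>
        simp [rowMergeA, List.foldr, rmBStep, if_neg h, ih row, hrow]


-- ===== VERDICT (by name: the statement is the Claim_ definition above) =====
theorem row_merge_spec : Claim_equal_row_merge := by
  intro s _ _
  unfold Spec_row_merge row_merge
  rw [rowMergeA_eq, row_merge_alt_foldr]
  simp
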